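-- pv_equiv track=rewrite | github.com/nekto007/language_learning_tool | app/nlp/processor.py | prepare_word_data
-- ===== SOURCE A (Python) =====
-- from typing import List, Set, Tuple
--
-- def prepare_word_data(words: List[str], brown_words: Set[str]) -> List[Tuple]:
--     """
--     Prepares word data for insertion into the database.
--
--     Args:
--         words (List[str]): List of words.
--         brown_words (Set[str]): Set of words from the Brown corpus.
--
--     Returns:
--         List[Tuple]: List of tuples (word, listening_link, in_brown, frequency).
--     """
--     data = []
--     word_counts = {}
--
--     # Count word frequency
--     for word in words:
--         word_counts[word] = word_counts.get(word, 0) + 1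
--
--     # Form data
--     for word, frequency in word_counts.items():
--         in_brown = word in brown_words
--         listening_link = f"https://forvo.com/word/{word}/#en"
--         data.append((word, listening_link, int(in_brown), frequency))
--
--     return data
-- ===== SOURCE B (Python) =====
-- def prepare_word_data(words, brown_words):
--     """Dict-free: keep first occurrences via a prefix test, count each word directly."""
--     return [(w, f"https://forvo.com/word/{w}/#en", int(w in brown_words), words.count(w))
--             for i, w in enumerate(words) if w not in words[:i]]
-- ===== Notes on version B (the rewrite author's own statement) =====
-- stated objective: simpler
-- what changed: Drops A's counting dict entirely: a single comprehension keeps each word at its first occurrence (tested by membership in the prefix words[:i]) and computes its frequency directly with words.count(w).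
import Mathlib
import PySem

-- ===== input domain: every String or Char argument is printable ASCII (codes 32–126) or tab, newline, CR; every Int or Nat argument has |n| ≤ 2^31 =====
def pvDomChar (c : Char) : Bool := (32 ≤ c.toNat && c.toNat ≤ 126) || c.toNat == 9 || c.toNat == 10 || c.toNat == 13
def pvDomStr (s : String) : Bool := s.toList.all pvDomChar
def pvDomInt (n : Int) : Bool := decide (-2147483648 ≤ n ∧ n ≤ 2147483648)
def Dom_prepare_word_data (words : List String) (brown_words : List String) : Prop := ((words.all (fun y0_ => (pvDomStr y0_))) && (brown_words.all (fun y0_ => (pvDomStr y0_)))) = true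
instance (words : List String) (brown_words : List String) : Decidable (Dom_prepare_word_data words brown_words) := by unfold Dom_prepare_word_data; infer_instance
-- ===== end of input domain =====

-- B drops A's counting dict: one comprehension keeps first occurrences (prefix membership
-- test) and counts each kept word directly; simpler code, not faster (quadratic).

-- ===== PORT A =====
def prepare_word_data (words : List String) (brown_words : List String) :
    List (String × String × Int × Int) :=
  -- word_counts[word] = word_counts.get(word, 0) + 1, then the items loop appending tuples
  let word_counts : PySem.Dict String Int :=
    words.foldl (fun d word => d.insert word (d.getD word 0 + 1)) PySem.Dict.empty
  word_counts.items.foldl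
    (fun data wf =>
      data ++ [(wf.1, "https://forvo.com/word/" ++ wf.1 ++ "/#en",
                if wf.1 ∈ brown_words then (1 : Int) else 0, wf.2)])
    []

-- ===== PORT B =====
-- [(w, link, int(w in brown), words.count(w)) for i, w in enumerate(words) if w not in words[:i]]
def prepare_word_data_alt (words : List String) (brown_words : List String) :
    List (String × String × Int × Int) :=
  (PySem.List.enumerate words 0).foldl
    (fun acc q =>
      if q.2 ∈ PySem.List.slice words none (some q.1) then acc
      else acc ++ [(q.2, "https://forvo.com/word/" ++ q.2 ++ "/#en",
                    if q.2 ∈ brown_words then (1 : Int) else 0,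
                    (PySem.List.count words q.2 : Int))])
    []

-- ===== PRECONDITION & SPEC =====
def Spec_prepare_word_data (words : List String) (brown_words : List String) (out : List (String × String × Int × Int)) : Prop := out = prepare_word_data_alt words brown_words
instance (words : List String) (brown_words : List String) (out : List (String × String × Int × Int)) : Decidable (Spec_prepare_word_data words brown_words out) := by unfold Spec_prepare_word_data; infer_instance

-- ===== CLAIM =====
def Claim_equal_prepare_word_data : Prop := ∀ (words : List String) (brown_words : List String), Dom_prepare_word_data words brown_words → Spec_prepare_word_data words brown_words (prepare_word_data words brown_words)

-- ===== LEMMAS AND PROOFS =====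

-- the tuple built for word w (frequency counted over the whole input)
def pwdF (brown words : List String) (w : String) : String × String × Int × Int :=
  (w, "https://forvo.com/word/" ++ w ++ "/#en",
   if w ∈ brown then (1 : Int) else 0, (words.count w : Int))

lemma pwd_loop (brown words : List String) : ∀ (l p : List String), words = p ++ l →
    (PySem.List.enumerate l ((p.length : Nat) : Int)).foldl
      (fun acc q =>
        if q.2 ∈ PySem.List.slice words none (some q.1) then acc
        else acc ++ [(q.2, "https://forvo.com/word/" ++ q.2 ++ "/#en",
                      if q.2 ∈ brown then (1 : Int) else 0,
                      (PySem.List.count words q.2 : Int))])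
      ((PySem.Set.ofList p).map (pwdF brown words))
    = (PySem.Set.ofList words).map (pwdF brown words) := by
  intro l
  induction l with
  | nil => intro p hp; simp [hp]
  | cons x t ih =>
      intro p hp
      rw [PySem.List.enumerate_cons, List.foldl_cons]
      have hslice : PySem.List.slice words none (some ((p.length : Nat) : Int)) = p := by
        rw [PySem.List.slice_to_natCast, hp, List.take_left]
      have hcast : ((p.length : Nat) : Int) + 1 = (((p ++ [x]).length : Nat) : Int) := by
        simp
      by_cases hx : x ∈ p
      · rw [if_pos (by simpa [hslice] using hx)]
        have := ih (p ++ [x]) (by simp [hp])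
        rw [hcast]
        rwa [PySem.Set.ofList_append_singleton,
             PySem.Set.add_of_mem ((PySem.Set.mem_ofList p x).mpr hx)] at this
      · rw [if_neg (by simpa [hslice] using hx)]
        have := ih (p ++ [x]) (by simp [hp])
        rw [hcast]
        rwa [PySem.Set.ofList_append_singleton,
             PySem.Set.add_of_not_mem (fun h => hx ((PySem.Set.mem_ofList p x).mp h)),
             List.map_append] at this
        -- the appended singleton is exactly pwdF brown words x

-- ===== VERDICT =====
theorem prepare_word_data_spec : Claim_equal_prepare_word_data := by
  intro words brown _
  unfold Spec_prepare_word_data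
  have hB : prepare_word_data_alt words brown
      = (PySem.Set.ofList words).map (pwdF brown words) := by
    unfold prepare_word_data_alt
    have h := pwd_loop brown words words [] (by simp)
    simpa [pwdF, PySem.List.count_eq] using h
  have hA : prepare_word_data words brown
      = (PySem.Set.ofList words).map (pwdF brown words) := by
    unfold prepare_word_data
    simp only [PySem.Dict.foldl_insert_getD_add_one_eq_counter, PySem.Dict.items_counter,
        PySem.List.foldl_append_singleton_eq_map]
    simp [List.map_map, pwdF, Function.comp]
  rw [hA, hB]
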